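-- pv_equiv track=rewrite | github.com/Raghavvsingh/OrchestAI | backend/agents/coordinator.py | _merge_comparison_dimensions
-- ===== SOURCE A (Python) =====
-- from typing import Dict, Any, Optional, List
--
-- def _merge_comparison_dimensions(rows: List[Dict], entities: List[str]) -> List[Dict]:
--     """Merge comparison rows from all tasks into unified dimensions."""
--     # Group by attribute
--     by_attribute = {}
--     for row in rows:
--         attr = row.get("attribute", "Unknown")
--         if attr not in by_attribute:
--             by_attribute[attr] = row
--         # Keep the most complete row
--         elif row.get("winner"):
--             by_attribute[attr] = row
--
--     return list(by_attribute.values())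
-- ===== SOURCE B (Python) =====
-- from typing import Dict, Any, Optional, List
--
-- def _merge_comparison_dimensions(rows: List[Dict], entities: List[str]) -> List[Dict]:
--     """Merge comparison rows from all tasks into unified dimensions."""
--     # First pass: group all rows by attribute, in first-appearance order.
--     groups = {}
--     for row in rows:
--         groups.setdefault(row.get("attribute", "Unknown"), []).append(row)
--     # Second pass: one representative per group — the last row with a truthy
--     # winner, falling back to the group's first row.
--     merged = []
--     for grp in groups.values():
--         rep = grp[0]
--         for r in grp[1:]:
--             if r.get("winner"):
--                 rep = r
--         merged.append(rep)
--     return merged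
-- ===== Notes on version B (the rewrite author's own statement) =====
-- stated objective: alternative
-- what changed: Replaces A's single-pass keep-or-overwrite dict of representative rows by a two-pass design: first group all rows into lists per attribute (dict insertion order), then reduce each group to its last truthy-winner row, falling back to the group's first row.
import Mathlib
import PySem

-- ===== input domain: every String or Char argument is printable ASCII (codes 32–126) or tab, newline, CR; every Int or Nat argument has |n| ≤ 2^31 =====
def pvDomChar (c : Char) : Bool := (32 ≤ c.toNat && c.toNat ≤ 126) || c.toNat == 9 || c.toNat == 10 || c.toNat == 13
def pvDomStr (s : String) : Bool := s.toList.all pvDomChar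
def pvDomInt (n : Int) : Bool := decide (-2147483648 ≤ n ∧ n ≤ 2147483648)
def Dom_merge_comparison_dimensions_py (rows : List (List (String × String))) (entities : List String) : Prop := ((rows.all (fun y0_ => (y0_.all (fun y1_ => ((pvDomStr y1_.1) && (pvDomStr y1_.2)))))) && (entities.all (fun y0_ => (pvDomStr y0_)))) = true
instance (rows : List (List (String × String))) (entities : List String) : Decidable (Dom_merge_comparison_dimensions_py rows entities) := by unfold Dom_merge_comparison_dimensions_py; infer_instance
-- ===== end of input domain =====

-- B replaces A's single-pass keep-or-overwrite dict of rows by a two-pass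
-- group-by-attribute then reduce-each-group design (alternative decomposition,
-- same cost); return values proved equal on all inputs.


-- ===== PORT A =====
-- row.get(k, d): rows arrive as Python dicts (association lists, first-match lookup)
def pvRowGet (row : List (String × String)) (k d : String) : String :=
  (PySem.Dict.mk row).getD k d

-- truthiness of row.get("winner"): present and non-empty (values are str; missing → "")
def pvWinner (row : List (String × String)) : Bool :=
  pvRowGet row "winner" "" ≠ ""

def merge_comparison_dimensions_py (rows : List (List (String × String))) (entities : List String) : List (List (String × String)) :=
  (rows.foldl (fun d row =>
      let attr := pvRowGet row "attribute" "Unknown"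
      if d.contains attr = false then d.insert attr row
      else if pvWinner row then d.insert attr row
      else d)
    PySem.Dict.empty).values

-- ===== PORT B =====
-- rep = grp[0]; for r in grp[1:]: if r.get("winner"): rep = r
def pvPick (grp : List (List (String × String))) : List (String × String) :=
  match grp with
  | [] => []
  | h :: t => t.foldl (fun rep r => if pvWinner r then r else rep) h

def merge_comparison_dimensions_py_alt (rows : List (List (String × String))) (entities : List String) : List (List (String × String)) :=
  let groups := rows.foldl (fun g row =>
      let attr := pvRowGet row "attribute" "Unknown"
      g.insert attr (g.getD attr [] ++ [row]))   -- setdefault(attr, []).append(row)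
    PySem.Dict.empty
  groups.items.map (fun p => pvPick p.2)

-- ===== PRECONDITION & SPEC =====
def Spec_merge_comparison_dimensions_py (rows : List (List (String × String))) (entities : List String) (out : List (List (String × String))) : Prop := out = merge_comparison_dimensions_py_alt rows entities
instance (rows : List (List (String × String))) (entities : List String) (out : List (List (String × String))) : Decidable (Spec_merge_comparison_dimensions_py rows entities out) := by unfold Spec_merge_comparison_dimensions_py; infer_instance

-- ===== CLAIM (what is proved, stated in full; the proofs are below) =====
def Claim_equal_merge_comparison_dimensions_py : Prop := ∀ (rows : List (List (String × String))) (entities : List String), Dom_merge_comparison_dimensions_py rows entities → Spec_merge_comparison_dimensions_py rows entities (merge_comparison_dimensions_py rows entities)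

-- ===== LEMMAS AND PROOFS =====

-- the reduction applied to each group in B's second pass
lemma pvPick_append_winner (l : List (List (String × String))) (r : List (String × String))
    (h : pvWinner r = true) : pvPick (l ++ [r]) = r := by
  cases l with
  | nil => simp [pvPick]
  | cons a t => simp [pvPick, List.foldl_append, h]

lemma pvPick_append_not_winner (l : List (List (String × String))) (r : List (String × String))
    (h : pvWinner r = false) (hl : l ≠ []) : pvPick (l ++ [r]) = pvPick l := by
  cases l with
  | nil => exact absurd rfl hl
  | cons a t => simp [pvPick, List.foldl_append, h]

lemma pvKeys_eq_map_fst {ν : Type} (d : PySem.Dict String ν) : d.keys = d.items.map Prod.fst :=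
  List.toList_toArray.symm

lemma pvValues_eq_map_snd {ν : Type} (d : PySem.Dict String ν) : d.values = d.items.map Prod.snd :=
  List.toList_toArray.symm

lemma pvContains_congr {ν₁ ν₂ : Type} (dA : PySem.Dict String ν₁) (dG : PySem.Dict String ν₂)
    (h : dA.keys = dG.keys) (k : String) : dA.contains k = dG.contains k := by
  rw [PySem.Dict.contains_eq_decide_mem_keys, PySem.Dict.contains_eq_decide_mem_keys, h]

-- loop invariant: A's dict is B's grouping dict with each group reduced by pvPick
lemma pv_inv (rows : List (List (String × String)))
    (dA : PySem.Dict String (List (String × String)))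
    (dG : PySem.Dict String (List (List (String × String))))
    (hnodup : dG.keys.Nodup)
    (hne : ∀ p ∈ dG.items, p.2 ≠ ([] : List (List (String × String))))
    (hitems : dA.items = dG.items.map (fun p => (p.1, pvPick p.2))) :
    (rows.foldl (fun d row =>
        let attr := pvRowGet row "attribute" "Unknown"
        if d.contains attr = false then d.insert attr row
        else if pvWinner row then d.insert attr row
        else d) dA).items
      = ((rows.foldl (fun g row =>
          let attr := pvRowGet row "attribute" "Unknown"
          g.insert attr (g.getD attr [] ++ [row])) dG).items).map (fun p => (p.1, pvPick p.2)) := by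
  induction rows generalizing dA dG with
  | nil => simpa using hitems
  | cons row rest ih =>
    simp only [List.foldl_cons]
    set attr := pvRowGet row "attribute" "Unknown" with hattr
    have hkeys : dA.keys = dG.keys := by
      rw [pvKeys_eq_map_fst, pvKeys_eq_map_fst, hitems, List.map_map]; rfl
    have hcont : dA.contains attr = dG.contains attr := pvContains_congr dA dG hkeys attr
    have hnodup' : (dG.insert attr (dG.getD attr [] ++ [row])).keys.Nodup :=
      PySem.Dict.nodup_keys_insert dG attr _ hnodup
    have hne' : ∀ p ∈ (dG.insert attr (dG.getD attr [] ++ [row])).items,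
        p.2 ≠ ([] : List (List (String × String))) := by
      intro p hp
      rcases (PySem.Dict.mem_items_insert dG attr _ p).1 hp with h | h
      · subst h; simp
      · exact hne p h.1
    apply ih _ _ hnodup' hne'
    by_cases hc : dG.contains attr = true
    · -- key already present
      have hcA : dA.contains attr = true := by rw [hcont]; exact hc
      rw [PySem.Dict.items_insert_of_contains dG _ hc]
      by_cases hw : pvWinner row = true
      · -- elif row.get("winner"): overwrite
        simp only [hcA, Bool.true_eq_false, if_false, hw, if_true]
        rw [PySem.Dict.items_insert_of_contains dA _ hcA, hitems,
            List.map_map, List.map_map]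
        apply List.map_congr_left
        intro p hp
        by_cases hpk : (p.1 == attr) = true
        · simp [Function.comp, hpk, pvPick_append_winner _ _ hw]
        · simp [Function.comp, hpk]
      · -- not a winner: A keeps the first row
        simp only [hcA, Bool.true_eq_false, if_false, hw, Bool.false_eq_true, if_false]
        rw [hitems, List.map_map]
        apply List.map_congr_left
        intro p hp
        by_cases hpk : (p.1 == attr) = true
        · have hpk' : p.1 = attr := by simpa using hpk
          have hval : dG.getD attr [] = p.2 := by
            have : (p.1, p.2) ∈ dG.items := hp
            rw [hpk'] at this
            exact PySem.Dict.getD_of_mem_items dG this hnodup []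
          simp [Function.comp, hval,
            pvPick_append_not_winner p.2 row (by simpa using hw) (hne p hp), hpk']
        · simp [Function.comp, hpk]
    · -- new key: both sides append
      have hc' : dG.contains attr = false := by simpa using hc
      have hcA : dA.contains attr = false := by rw [hcont]; exact hc'
      have hg0 : dG.getD attr ([] : List (List (String × String))) = [] :=
        PySem.Dict.getD_of_not_contains dG _ hc'
      simp only [hcA, if_true]
      rw [PySem.Dict.items_insert_of_not_contains dA _ hcA,
          PySem.Dict.items_insert_of_not_contains dG _ hc', hg0, hitems]
      simp [pvPick]

-- ===== VERDICT (by name: the statement is the Claim_ definition above) =====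
theorem merge_comparison_dimensions_py_spec : Claim_equal_merge_comparison_dimensions_py := by
  intro rows entities _hDom
  unfold Spec_merge_comparison_dimensions_py merge_comparison_dimensions_py merge_comparison_dimensions_py_alt
  rw [pvValues_eq_map_snd,
      pv_inv rows PySem.Dict.empty PySem.Dict.empty (by simp) (by intro p hp; simp [PySem.Dict.empty] at hp) (by rfl),
      List.map_map]
  rfl
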